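-- pv_equiv track=rewrite | github.com/mjjungg/TIL | Algorithm/Programmers/Lv2/땅따먹기.py | solution
-- ===== SOURCE A (Python) =====
-- def solution(land):
--     answer = 0
--     dp = [[0 for _ in range(4)] for _ in range(len(land))]
--
--     for i in range(4):
--         dp[0][i] = land[0][i]
--
--     for i in range(1, len(land)):
--         for j in range(4):
--             max_val = 0
--             for k in range(4):
--                 if j != k and max_val < dp[i-1][k]:
--                     max_val = dp[i-1][k]
--             dp[i][j] = land[i][j] + max_val
--
--     return max(dp[-1])
-- ===== SOURCE B (Python) =====
-- def solution(land):
--     prev = land[0][:4]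
--     for row in land[1:]:
--         # one top-two scan of prev replaces the per-column inner scan
--         best = second = None
--         bi = -1
--         for idx, v in enumerate(prev):
--             if best is None or v > best:
--                 second = best
--                 best = v
--                 bi = idx
--             elif second is None or v > second:
--                 second = v
--         prev = [row[j] + max(0, second if j == bi else best) for j in range(4)]
--     return max(prev)
-- ===== Notes on version B (the rewrite author's own statement) =====
-- stated objective: alternative
-- what changed: Replaces the full dp table and the per-column inner scan over all other columns with a rolling previous-row list and a single top-two (max and second-max with argmax) scan per row, choosing the second maximum only in the argmax column; measured runtimes are similar.
import Mathlib
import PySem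

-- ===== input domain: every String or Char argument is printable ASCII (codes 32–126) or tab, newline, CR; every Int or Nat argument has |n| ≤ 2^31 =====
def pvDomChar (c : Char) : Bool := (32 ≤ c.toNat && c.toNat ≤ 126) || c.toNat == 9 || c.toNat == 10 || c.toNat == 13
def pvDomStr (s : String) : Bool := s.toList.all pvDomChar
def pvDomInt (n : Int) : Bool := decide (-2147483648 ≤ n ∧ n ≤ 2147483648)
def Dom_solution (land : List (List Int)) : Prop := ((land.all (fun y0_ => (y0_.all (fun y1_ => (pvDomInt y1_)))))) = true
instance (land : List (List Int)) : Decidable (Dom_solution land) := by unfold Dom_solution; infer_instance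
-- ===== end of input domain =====

-- B replaces A's full dp table and per-column inner scan (j≠k double loop) with a rolling
-- previous-row list and one top-two (max/second-max/argmax) scan per row (alternative algorithm,
-- similar measured cost).


-- ===== PORT A =====
-- A-side helper: the inner 'for k in range(4)' scan computing max_val for column j.
def aInner (prev : List Int) (j : Nat) : Int :=
  (List.range 4).foldl
    (fun mv k => if j ≠ k ∧ mv < prev.getD k 0 then prev.getD k 0 else mv) 0

-- A-side helper: the body of 'for i in range(1, len(land))' (dp is the whole table, i the row index).
-- Indices i, i-1, j are nonnegative and in range under Pre_, so getD/toNat are exact here.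
def aStep (land : List (List Int)) (dp : List (List Int)) (i : Int) : List (List Int) :=
  dp.set i.toNat
    ((List.range 4).foldl
      (fun r j => r.set j ((land.getD i.toNat []).getD j 0 + aInner (dp.getD (i.toNat - 1) []) j))
      (dp.getD i.toNat []))

-- Under Pre_, land[0][i] indices are in range (getD exact) and dp[-1] is a nonempty row (max? exact).
def solution (land : List (List Int)) : Int :=
  let n := land.length
  let dp0 : List (List Int) := (List.range n).map (fun _ => (List.range 4).map (fun _ => (0 : Int)))
  let dp1 : List (List Int) :=
    dp0.set 0 ((List.range 4).foldl
      (fun r i => r.set i ((land.getD 0 []).getD i 0)) (dp0.getD 0 []))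
  let dpF : List (List Int) := (PySem.List.pyRange 1 (n : Int) 1).foldl (aStep land) dp1
  (PySem.List.max? (PySem.List.pyGetD dpF (-1) []) (fun x => x)).getD 0

-- ===== PORT B =====
-- B-side helper: the loop body — one top-two scan of prev (best, second, argmax), then the new row.
-- Under Pre_ prev has 4 elements, so best/second are set and bi ≥ 0 when read (getD exact);
-- row[j] for j < 4 is in range under Pre_, so getD is exact.
def bStep (prev row : List Int) : List Int :=
  let scan : Option Int × Option Int × Int :=
    (PySem.List.enumerate prev 0).foldl
      (fun st p =>
        match st with
        | (none, second, _) => (some p.2, second, p.1)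
        | (some best, second, bi) =>
          if best < p.2 then (some p.2, some best, p.1)
          else
            match second with
            | none => (some best, some p.2, bi)
            | some s => if s < p.2 then (some best, some p.2, bi) else (some best, some s, bi))
      (none, none, -1)
  (List.range 4).map (fun j =>
    row.getD j 0 + max 0 (if (j : Int) = scan.2.2 then scan.2.1.getD 0 else scan.1.getD 0))

def solution_alt (land : List (List Int)) : Int :=
  let prev0 := PySem.List.slice (land.getD 0 []) none (some 4)
  let prevF := (PySem.List.slice land (some 1) none).foldl bStep prev0
  (PySem.List.max? prevF (fun x => x)).getD 0

-- ===== PRECONDITION & SPEC =====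
-- Exactly where the Python A returns: a nonempty land whose every row has at least 4 entries
-- (otherwise land[0][i] / land[i][j] / max(dp[-1]) raise IndexError / ValueError).
def Pre_solution (land : List (List Int)) : Prop :=
  land ≠ [] ∧ ∀ row ∈ land, 4 ≤ row.length
instance (land : List (List Int)) : Decidable (Pre_solution land) := by
  unfold Pre_solution; infer_instance

def pvWitness_solution : List (List Int) := [[1, 2, 3, 4], [5, 6, 7, 8]]

def Spec_solution (land : List (List Int)) (out : Int) : Prop := out = solution_alt land
instance (land : List (List Int)) (out : Int) : Decidable (Spec_solution land out) := by
  unfold Spec_solution; infer_instance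

-- ===== CLAIM (what is proved, stated in full; the proofs are below) =====
def Claim_equal_solution : Prop :=
  ∀ (land : List (List Int)), Dom_solution land → Pre_solution land →
    Spec_solution land (solution land)

-- ===== LEMMAS AND PROOFS =====

-- The abstract one-row recurrence both programs compute.
def stepA (prev row : List Int) : List Int :=
  (List.range 4).map (fun j => row.getD j 0 + aInner prev j)

-- Writing dp[i][j] for j = 0..3 into a zero row builds exactly the mapped row.
lemma setfold_zero_row (f : Nat → Int) :
    (List.range 4).foldl (fun r i => r.set i (f i)) ([0, 0, 0, 0] : List Int)
      = (List.range 4).map f := by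
  rfl

lemma getD_map_zero (n k : Nat) (hk : k < n) :
    (((List.range n).map (fun _ => (List.range 4).map (fun _ => (0 : Int)))).getD k [])
      = [0, 0, 0, 0] := by
  rw [List.getD_eq_getElem?_getD, List.getElem?_map, List.getElem?_range hk]
  rfl

lemma getD_set_ne (l : List (List Int)) (m k : Nat) (v : List Int) (h : m ≠ k) :
    (l.set m v).getD k [] = l.getD k [] := by
  simp [List.getD_eq_getElem?_getD, h]

lemma getD_set_self (l : List (List Int)) (m : Nat) (v : List Int) (h : m < l.length) :
    (l.set m v).getD m [] = v := by
  simp [List.getD_eq_getElem?_getD, h]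

-- The main-loop invariant for A: after running rows m..n-1, the last dp row is the fold of stepA.
lemma loopA (land : List (List Int)) :
    ∀ (c m : Nat) (dp : List (List Int)),
      c = land.length - m → 1 ≤ m → m ≤ land.length → dp.length = land.length →
      (∀ k, m ≤ k → k < land.length → dp.getD k [] = [0, 0, 0, 0]) →
      ((PySem.List.pyRange (m : Int) (land.length : Int) 1).foldl (aStep land) dp).getD
          (land.length - 1) []
        = (land.drop m).foldl stepA (dp.getD (m - 1) []) := by
  intro c
  induction c with
  | zero =>
    intro m dp hc _ hm2 _ _
    have hmn : m = land.length := by omega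
    subst hmn
    rw [PySem.List.pyRange_one_eq_nil (by omega), List.foldl_nil, List.drop_length,
      List.foldl_nil]
  | succ c ih =>
    intro m dp hc hm1 hm2 hlen hz
    have hmlt : m < land.length := by omega
    rw [PySem.List.pyRange_one_cons (by exact_mod_cast hmlt)]
    rw [List.foldl_cons]
    have hstep : aStep land dp (m : Int)
        = dp.set m (stepA (dp.getD (m - 1) []) (land.getD m [])) := by
      unfold aStep
      rw [Int.toNat_natCast]
      rw [hz m le_rfl hmlt, setfold_zero_row]
      rfl
    rw [hstep]
    have hcast : ((m : Int) + 1) = ((m + 1 : Nat) : Int) := by push_cast; ring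
    rw [hcast]
    rw [ih (m + 1) _ (by omega) (by omega) (by omega)
        (by rw [List.length_set]; exact hlen)
        (by
          intro k hk1 hk2
          rw [getD_set_ne _ _ _ _ (by omega)]
          exact hz k (by omega) hk2)]
    rw [Nat.add_sub_cancel, getD_set_self _ _ _ (by omega)]
    have hdrop : land.drop m = land[m] :: land.drop (m + 1) :=
      List.drop_eq_getElem_cons hmlt
    rw [hdrop, List.foldl_cons]
    have hg : land.getD m [] = land[m] := List.getD_eq_getElem land [] hmlt
    rw [hg]

-- A's port, under Pre_, is the fold of stepA over the tail, started at the first four entries.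
lemma len_fold_aStep (land : List (List Int)) :
    ∀ (is : List Int) (dp : List (List Int)),
      (is.foldl (aStep land) dp).length = dp.length := by
  intro is
  induction is with
  | nil => intro dp; rfl
  | cons i t ih => intro dp; rw [List.foldl_cons, ih, aStep, List.length_set]

lemma solution_eq_fold (land : List (List Int)) (hne : land ≠ []) :
    solution land
      = (PySem.List.max?
          (land.tail.foldl stepA ((List.range 4).map (fun i => (land.getD 0 []).getD i 0)))
          (fun x => x)).getD 0 := by
  unfold solution
  dsimp only
  have hn : 1 ≤ land.length := by
    cases land with
    | nil => exact absurd rfl hne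
    | cons h t => simp
  have hz0 : (((List.range land.length).map
      (fun _ => (List.range 4).map (fun _ => (0 : Int)))).getD 0 []) = [0, 0, 0, 0] :=
    getD_map_zero _ _ (by omega)
  rw [hz0, setfold_zero_row]
  set dp1 := ((List.range land.length).map
      (fun _ => (List.range 4).map (fun _ => (0 : Int)))).set 0
      ((List.range 4).map (fun i => (land.getD 0 []).getD i 0)) with hdp1
  have hlen1 : dp1.length = land.length := by
    rw [hdp1, List.length_set, List.length_map, List.length_range]
  have hloop := loopA land (land.length - 1) 1 dp1
    (by omega) le_rfl hn hlen1
    (by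
      intro k hk1 hk2
      rw [hdp1, getD_set_ne _ _ _ _ (by omega)]
      exact getD_map_zero _ _ hk2)
  norm_num at hloop
  set dpF := (PySem.List.pyRange (1 : Int) (land.length : Int) 1).foldl (aStep land) dp1
    with hdpF
  have hlenF : dpF.length = land.length := by
    rw [hdpF, len_fold_aStep land _ dp1, hlen1]
  have hFne : dpF ≠ [] := by
    intro h; rw [h] at hlenF; simp at hlenF; omega
  have hidx : land.length - 1 < dpF.length := by omega
  have hlast : PySem.List.pyGetD dpF (-1) [] = dpF.getD (land.length - 1) [] := by
    rw [PySem.List.pyGetD_neg_one dpF [] hFne, List.getD_eq_getElem dpF [] hidx,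
      List.getLast_eq_getElem]
    congr 1
    omega
  have hgd1 : dp1.getD 0 [] = (List.range 4).map (fun i => (land.getD 0 []).getD i 0) := by
    rw [hdp1]; exact getD_set_self _ _ _ (by rw [List.length_map, List.length_range]; omega)
  rw [hlast, List.getD_eq_getElem?_getD, hloop, ← List.getD_eq_getElem?_getD, hgd1]

-- B's loop body equals stepA whenever prev has exactly four entries.
set_option maxHeartbeats 1000000 in
set_option maxRecDepth 8192 in
lemma bStep_eq_stepA (a b c d : Int) (row : List Int) :
    bStep [a, b, c, d] row = stepA [a, b, c, d] row := by
  unfold bStep stepA aInner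
  simp only [PySem.List.enumerate_cons, PySem.List.enumerate_nil, List.foldl_cons, List.foldl_nil,
    show List.range 4 = [0,1,2,3] from rfl, List.map_cons, List.map_nil,
    List.getD_cons_succ, List.getD_cons_zero]
  try dsimp only
  rcases lt_or_ge a b with h1 | h1
  · simp only [if_pos h1]
    try dsimp only
    rcases lt_or_ge b c with h2 | h2
    · simp only [if_pos h2]
      try dsimp only
      rcases lt_or_ge c d with h3 | h3
      · simp only [if_pos h3]
        try dsimp only
        norm_num
        refine ⟨?_, ?_, ?_, ?_⟩ <;> (try split_ifs) <;> omega
      · simp only [if_neg (not_lt.2 h3)]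
        try dsimp only
        rcases lt_or_ge b d with h3b | h3b
        · simp only [if_pos h3b]
          try dsimp only
          norm_num
          refine ⟨?_, ?_, ?_, ?_⟩ <;> (try split_ifs) <;> omega
        · simp only [if_neg (not_lt.2 h3b)]
          try dsimp only
          norm_num
          refine ⟨?_, ?_, ?_, ?_⟩ <;> (try split_ifs) <;> omega
    · simp only [if_neg (not_lt.2 h2)]
      try dsimp only
      rcases lt_or_ge a c with h2b | h2b
      · simp only [if_pos h2b]
        try dsimp only
        rcases lt_or_ge b d with h4 | h4
        · simp only [if_pos h4]
          try dsimp only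
          norm_num
          refine ⟨?_, ?_, ?_, ?_⟩ <;> (try split_ifs) <;> omega
        · simp only [if_neg (not_lt.2 h4)]
          try dsimp only
          rcases lt_or_ge c d with h4b | h4b
          · simp only [if_pos h4b]
            try dsimp only
            norm_num
            refine ⟨?_, ?_, ?_, ?_⟩ <;> (try split_ifs) <;> omega
          · simp only [if_neg (not_lt.2 h4b)]
            try dsimp only
            norm_num
            refine ⟨?_, ?_, ?_, ?_⟩ <;> (try split_ifs) <;> omega
      · simp only [if_neg (not_lt.2 h2b)]
        try dsimp only
        rcases lt_or_ge b d with h4 | h4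
        · simp only [if_pos h4]
          try dsimp only
          norm_num
          refine ⟨?_, ?_, ?_, ?_⟩ <;> (try split_ifs) <;> omega
        · simp only [if_neg (not_lt.2 h4)]
          try dsimp only
          rcases lt_or_ge a d with h4b | h4b
          · simp only [if_pos h4b]
            try dsimp only
            norm_num
            refine ⟨?_, ?_, ?_, ?_⟩ <;> (try split_ifs) <;> omega
          · simp only [if_neg (not_lt.2 h4b)]
            try dsimp only
            norm_num
            refine ⟨?_, ?_, ?_, ?_⟩ <;> (try split_ifs) <;> omega
  · simp only [if_neg (not_lt.2 h1)]
    try dsimp only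
    rcases lt_or_ge a c with h2 | h2
    · simp only [if_pos h2]
      try dsimp only
      rcases lt_or_ge c d with h3 | h3
      · simp only [if_pos h3]
        try dsimp only
        norm_num
        refine ⟨?_, ?_, ?_, ?_⟩ <;> (try split_ifs) <;> omega
      · simp only [if_neg (not_lt.2 h3)]
        try dsimp only
        rcases lt_or_ge a d with h3b | h3b
        · simp only [if_pos h3b]
          try dsimp only
          norm_num
          refine ⟨?_, ?_, ?_, ?_⟩ <;> (try split_ifs) <;> omega
        · simp only [if_neg (not_lt.2 h3b)]
          try dsimp only
          norm_num
          refine ⟨?_, ?_, ?_, ?_⟩ <;> (try split_ifs) <;> omega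
    · simp only [if_neg (not_lt.2 h2)]
      try dsimp only
      rcases lt_or_ge b c with h2b | h2b
      · simp only [if_pos h2b]
        try dsimp only
        rcases lt_or_ge a d with h4 | h4
        · simp only [if_pos h4]
          try dsimp only
          norm_num
          refine ⟨?_, ?_, ?_, ?_⟩ <;> (try split_ifs) <;> omega
        · simp only [if_neg (not_lt.2 h4)]
          try dsimp only
          rcases lt_or_ge c d with h4b | h4b
          · simp only [if_pos h4b]
            try dsimp only
            norm_num
            refine ⟨?_, ?_, ?_, ?_⟩ <;> (try split_ifs) <;> omega
          · simp only [if_neg (not_lt.2 h4b)]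
            try dsimp only
            norm_num
            refine ⟨?_, ?_, ?_, ?_⟩ <;> (try split_ifs) <;> omega
      · simp only [if_neg (not_lt.2 h2b)]
        try dsimp only
        rcases lt_or_ge a d with h4 | h4
        · simp only [if_pos h4]
          try dsimp only
          norm_num
          refine ⟨?_, ?_, ?_, ?_⟩ <;> (try split_ifs) <;> omega
        · simp only [if_neg (not_lt.2 h4)]
          try dsimp only
          rcases lt_or_ge b d with h4b | h4b
          · simp only [if_pos h4b]
            try dsimp only
            norm_num
            refine ⟨?_, ?_, ?_, ?_⟩ <;> (try split_ifs) <;> omega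
          · simp only [if_neg (not_lt.2 h4b)]
            try dsimp only
            norm_num
            refine ⟨?_, ?_, ?_, ?_⟩ <;> (try split_ifs) <;> omega

lemma fold_bStep_eq (rows : List (List Int)) :
    ∀ prev : List Int, prev.length = 4 →
      rows.foldl bStep prev = rows.foldl stepA prev := by
  induction rows with
  | nil => intro prev _; rfl
  | cons r rs ih =>
    intro prev hp
    obtain ⟨a, b, c, d, hprev⟩ : ∃ a b c d, prev = [a, b, c, d] := by
      match prev, hp with
      | [a, b, c, d], _ => exact ⟨a, b, c, d, rfl⟩
    subst hprev
    rw [List.foldl_cons, List.foldl_cons, bStep_eq_stepA]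
    exact ih _ (by simp [stepA])

lemma take4_eq_map (xs : List Int) (h : 4 ≤ xs.length) :
    xs.take 4 = (List.range 4).map (fun i => xs.getD i 0) := by
  match xs, h with
  | a :: b :: c :: d :: rest, _ => rfl

-- ===== VERDICT (by name: the statement is the Claim_ definition above) =====
theorem solution_spec : Claim_equal_solution := by
  intro land _ hpre
  obtain ⟨hne, hrows⟩ := hpre
  unfold Spec_solution solution_alt
  dsimp only
  have hmem : land.getD 0 [] ∈ land := by
    cases land with
    | nil => exact absurd rfl hne
    | cons h t => simp [List.getD]
  have h04 : 4 ≤ (land.getD 0 []).length := hrows _ hmem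
  rw [PySem.List.slice_from_one, PySem.List.slice_to _ (by norm_num),
    show ((4 : Int)).toNat = 4 from rfl, take4_eq_map _ h04,
    fold_bStep_eq _ _ (by simp), solution_eq_fold land hne]
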